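-- pv_equiv track=rewrite | github.com/algebravic/resolving | resolving/hypercube.py | parity_vectors
-- ===== SOURCE A (Python) =====
-- from typing import Iterable, List, Tuple
--
-- VECTOR = Tuple[int,...]
--
-- def parity_vectors(num: int, parity: int) -> Iterable[VECTOR]:
--     """
--     All even weight 0/1 vectors of length n.
--     parity: 0/1
--     """
--     if num == 0:
--         if parity == 0:
--             yield tuple()
--     else:
--         for elt in range(2):
--             for vec in parity_vectors(num - 1, elt ^ parity):
--                 yield (elt,) + vec
-- ===== SOURCE B (Python) =====
-- def parity_vectors(num, parity):
--     """Breadth-first generate all 0/1 vectors of length num (lex order), then filter by parity."""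
--     vecs = [()]
--     for _ in range(num):
--         vecs = [v + (b,) for v in vecs for b in (0, 1)]
--     for v in vecs:
--         if sum(v) % 2 == parity:
--             yield v
-- ===== Notes on version B (the rewrite author's own statement) =====
-- stated objective: simpler
-- what changed: A recursively enumerates vectors while threading the required parity through XOR; B iteratively builds the full list of all 2^num 0/1 vectors in lexicographic order and then filters by sum(v) % 2 == parity.
import Mathlib
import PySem

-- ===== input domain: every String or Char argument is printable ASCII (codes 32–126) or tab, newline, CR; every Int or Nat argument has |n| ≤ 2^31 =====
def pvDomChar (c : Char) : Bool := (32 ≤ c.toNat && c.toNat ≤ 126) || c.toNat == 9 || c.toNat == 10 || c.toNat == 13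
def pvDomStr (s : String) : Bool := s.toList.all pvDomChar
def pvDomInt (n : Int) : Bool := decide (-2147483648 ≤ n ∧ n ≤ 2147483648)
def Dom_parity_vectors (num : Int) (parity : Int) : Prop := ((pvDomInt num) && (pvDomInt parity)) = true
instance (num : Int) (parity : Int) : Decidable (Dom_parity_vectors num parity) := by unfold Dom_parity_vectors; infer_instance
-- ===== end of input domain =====

-- B builds all 2^num 0/1 vectors breadth-first and filters by parity, instead of A's
-- parity-threaded recursion; same output and cost, chosen for simplicity.

-- ===== PORT A =====
-- A is structurally recursive on num; the Nat fuel num.toNat is exactly the recursion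
-- depth for num ≥ 0 (Pre_); for num < 0 Python A raises RecursionError (excluded by Pre_).
def parity_vectorsAux : Nat → Int → List (List Int)
  | 0, parity => if parity == 0 then [[]] else []
  | n + 1, parity =>
      (PySem.List.pyRange 0 2 1).flatMap (fun elt =>
        (parity_vectorsAux n (PySem.Int.bxor elt parity)).map (fun vec => elt :: vec))

def parity_vectors (num : Int) (parity : Int) : List (List Int) :=
  parity_vectorsAux num.toNat parity

-- ===== PORT B =====
-- the list comprehension [v + (b,) for v in vecs for b in (0, 1)] from Source B
def pvExtend (vecs : List (List Int)) : List (List Int) :=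
  vecs.flatMap (fun v => ([0, 1] : List Int).map (fun b => v ++ [b]))

def parity_vectors_alt (num : Int) (parity : Int) : List (List Int) :=
  let vecs := (PySem.List.pyRange 0 num 1).foldl (fun vecs _ => pvExtend vecs) [[]]
  vecs.filter (fun v => PySem.Int.mod v.sum 2 == parity)

-- ===== PRECONDITION & SPEC =====
-- Pre_ excludes num < 0, where Python A raises RecursionError (it never returns there).
def Pre_parity_vectors (num : Int) (parity : Int) : Prop := 0 ≤ num
instance (num : Int) (parity : Int) : Decidable (Pre_parity_vectors num parity) := by
  unfold Pre_parity_vectors; infer_instance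

def pvWitness_parity_vectors : Int × Int := (3, 1)

def Spec_parity_vectors (num : Int) (parity : Int) (out : List (List Int)) : Prop :=
  out = parity_vectors_alt num parity
instance (num : Int) (parity : Int) (out : List (List Int)) :
    Decidable (Spec_parity_vectors num parity out) := by unfold Spec_parity_vectors; infer_instance

-- ===== CLAIM (what is proved, stated in full; the proofs are below) =====
def Claim_equal_parity_vectors : Prop := ∀ (num : Int) (parity : Int),
  Dom_parity_vectors num parity → Pre_parity_vectors num parity →
  Spec_parity_vectors num parity (parity_vectors num parity)

-- ===== LEMMAS AND PROOFS =====

-- the breadth-first state after n loop iterations of B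
def pvGen : Nat → List (List Int)
  | 0 => [[]]
  | n + 1 => pvExtend (pvGen n)

theorem pvGen_foldl (l : List Int) (n : Nat) :
    l.foldl (fun vecs _ => pvExtend vecs) (pvGen n) = pvGen (n + l.length) := by
  induction l generalizing n with
  | nil => simp
  | cons x xs ih =>
      simp only [List.foldl_cons, List.length_cons]
      have : pvExtend (pvGen n) = pvGen (n + 1) := rfl
      rw [this, ih]
      ring_nf

theorem pvExtend_map_cons (x : Int) (l : List (List Int)) :
    pvExtend (l.map (fun v => x :: v)) = (pvExtend l).map (fun v => x :: v) := by
  simp [pvExtend, List.flatMap_map, List.map_flatMap]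

-- left (first-bit) decomposition of the breadth-first generation
theorem pvGen_succ_left (n : Nat) :
    pvGen (n + 1) = (pvGen n).map (fun v => (0 : Int) :: v)
      ++ (pvGen n).map (fun v => (1 : Int) :: v) := by
  induction n with
  | zero => decide
  | succ n ih =>
      calc pvGen (n + 1 + 1) = pvExtend (pvGen (n + 1)) := rfl
        _ = pvExtend ((pvGen n).map (fun v => (0 : Int) :: v)
              ++ (pvGen n).map (fun v => (1 : Int) :: v)) := by rw [ih]
        _ = pvExtend ((pvGen n).map (fun v => (0 : Int) :: v))
              ++ pvExtend ((pvGen n).map (fun v => (1 : Int) :: v)) := by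
                simp [pvExtend]
        _ = (pvExtend (pvGen n)).map (fun v => (0 : Int) :: v)
              ++ (pvExtend (pvGen n)).map (fun v => (1 : Int) :: v) := by
                rw [pvExtend_map_cons, pvExtend_map_cons]
        _ = (pvGen (n + 1)).map (fun v => (0 : Int) :: v)
              ++ (pvGen (n + 1)).map (fun v => (1 : Int) :: v) := rfl

theorem bxor_one_eq (q : Int) : PySem.Int.bxor 1 q =
    if 0 ≤ q then (((1 ^^^ q.toNat : Nat)) : Int)
    else (-(((1 ^^^ (-q - 1).toNat : Nat)) : Int) - 1) := by
  unfold PySem.Int.bxor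
  norm_num

theorem bxor_one_cancel (p : Int) :
    PySem.Int.bxor 1 (PySem.Int.bxor 1 p) = p := by
  rw [bxor_one_eq p]
  by_cases hp : 0 ≤ p
  · rw [if_pos hp, bxor_one_eq, if_pos (Int.natCast_nonneg _), Int.toNat_natCast,
      Nat.xor_xor_cancel_left]
    omega
  · rw [if_neg hp, bxor_one_eq]
    have hneg : ¬ (0 ≤ -(((1 ^^^ (-p - 1).toNat : Nat)) : Int) - 1) := by
      have := Int.natCast_nonneg ((1 ^^^ (-p - 1).toNat : Nat)); omega
    rw [if_neg hneg]
    have h2 : (-(-(((1 ^^^ (-p - 1).toNat : Nat)) : Int) - 1) - 1).toNat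
        = (1 ^^^ (-p - 1).toNat : Nat) := by omega
    rw [h2, Nat.xor_xor_cancel_left]
    omega

theorem bxor_one_key (s p : Int) :
    (PySem.Int.mod (1 + s) 2 == p) = (PySem.Int.mod s 2 == PySem.Int.bxor 1 p) := by
  have h2 : (0:Int) < 2 := by norm_num
  by_cases h0 : p = 0
  · subst h0
    have : PySem.Int.bxor 1 0 = 1 := by decide
    rw [this, PySem.Int.mod_eq_emod_of_pos h2, PySem.Int.mod_eq_emod_of_pos h2]
    rw [Bool.eq_iff_iff]; simp only [beq_iff_eq]; omega
  · by_cases h1 : p = 1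
    · subst h1
      have : PySem.Int.bxor 1 1 = 0 := by decide
      rw [this, PySem.Int.mod_eq_emod_of_pos h2, PySem.Int.mod_eq_emod_of_pos h2]
      rw [Bool.eq_iff_iff]; simp only [beq_iff_eq]; omega
    · have hx0 : PySem.Int.bxor 1 p ≠ 0 := by
        intro h
        have := bxor_one_cancel p
        rw [h] at this
        exact h1 (by rw [← this]; decide)
      have hx1 : PySem.Int.bxor 1 p ≠ 1 := by
        intro h
        have := bxor_one_cancel p
        rw [h] at this
        exact h0 (by rw [← this]; decide)
      have hL : PySem.Int.mod (1 + s) 2 ≠ p := by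
        rcases PySem.Int.mod_two_eq (1 + s) with h | h <;> rw [h] <;> omega
      have hR : PySem.Int.mod s 2 ≠ PySem.Int.bxor 1 p := by
        rcases PySem.Int.mod_two_eq s with h | h <;> rw [h] <;> [exact fun e => hx0 e.symm; exact fun e => hx1 e.symm]
      rw [Bool.eq_iff_iff]; simp only [beq_iff_eq]
      exact ⟨fun h => absurd h hL, fun h => absurd h hR⟩

theorem aux_eq_filter (n : Nat) : ∀ p : Int,
    parity_vectorsAux n p = (pvGen n).filter (fun v => PySem.Int.mod v.sum 2 == p) := by
  induction n with
  | zero =>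
      intro p
      show (if p == 0 then [[]] else []) = _
      by_cases hp : p = 0 <;> simp [pvGen, hp, PySem.Int.mod] <;> omega
  | succ n ih =>
      intro p
      have hrange : PySem.List.pyRange 0 2 1 = [0, 1] := by decide
      show (PySem.List.pyRange 0 2 1).flatMap _ = _
      rw [hrange]
      simp only [List.flatMap_cons, List.flatMap_nil, List.append_nil]
      have hb0 : PySem.Int.bxor 0 p = p := by
        rw [PySem.Int.bxor_comm, PySem.Int.bxor_zero]
      rw [hb0, ih p, ih (PySem.Int.bxor 1 p), pvGen_succ_left, List.filter_append,
        List.filter_map, List.filter_map]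
      congr 1
      · exact congrArg _ (List.filter_congr fun v _ => by simp [Function.comp])
      · refine congrArg _ (List.filter_congr fun v _ => ?_)
        simp only [Function.comp_apply, List.sum_cons]
        exact (bxor_one_key v.sum p).symm

theorem ports_eq (num parity : Int) :
    parity_vectors num parity = parity_vectors_alt num parity := by
  unfold parity_vectors parity_vectors_alt
  have h0 : pvGen 0 = [[]] := rfl
  rw [← h0, pvGen_foldl, PySem.List.length_pyRange_one]
  simp only [Nat.zero_add, Int.sub_zero]
  exact aux_eq_filter num.toNat parity

-- ===== VERDICT (by name: the statement is the Claim_ definition above) =====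
theorem parity_vectors_spec : Claim_equal_parity_vectors := by
  intro num parity _ _
  unfold Spec_parity_vectors
  exact ports_eq num parity
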